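-- pv_equiv track=rewrite | github.com/jeffrylew/lc-crash-course | trees_and_graphs/detonate_the_maximum_bombs.py | maximumDetonationDFS
-- ===== SOURCE A (Python) =====
-- from collections import defaultdict
-- from collections import deque
--
-- def maximumDetonationDFS(bombs: list[list[int]]) -> int:
--     graph = defaultdict(list)
--     n = len(bombs)
--
--     # Build the graph
--     for i in range(n):
--         for j in range(i + 1, n):
--             xi, yi, ri = bombs[i]
--             xj, yj, rj = bombs[j]
--
--             dx2 = (xi - xj) ** 2
--             dy2 = (yi - yj) ** 2
--             ri2, rj2 = ri ** 2, rj **2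
--
--             # Create a path from node i to node j if bomb i detonates bomb j
--             if ri2 >= dx2 + dy2:
--                 graph[i].append(j)
--
--             # Create a path from node j to node i if bomb j detonates bomb i
--             if rj2 >= dx2 + dy2:
--                 graph[j].append(i)
--
--     # DFS to get the number of nodes reachable from a given node
--     def dfsRecursive(curr_node, visited):
--         visited.add(curr_node)
--
--         for neighbor in graph[curr_node]:
--             if neighbor not in visited:
--                 dfsRecursive(neighbor, visited)
--
--         return len(visited)
--
--     def dfsIterative(curr_node):
--         stack = [curr_node]
--         visited2 = set([curr_node])
--
--         while stack:
--             node = stack.pop()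
--
--             for neighbor in graph[node]:
--                 if neighbor not in visited2:
--                     visited2.add(neighbor)
--                     stack.append(neighbor)
--
--         return len(visited2)
--
--     # BFS to get the number of nodes reachable from a given node
--     def bfs(curr_node):
--         queue = deque([curr_node])
--         visited3 = set([curr_node])
--
--         while queue:
--             node = queue.popleft()
--
--             for neighbor in graph[node]:
--                 if neighbor not in visited3:
--                     visited3.add(neighbor)
--                     queue.append(neighbor)
--
--         return len(visited3)
--
--     ans = 0
--     for i in range(n):
--         # visited = set()
--         # ans = max(ans, dfsRecursive(i, visited))
--
--         # ans = max(ans, dfsIterative(i))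
--
--         ans = max(ans, bfs(i))
--
--     return ans
-- ===== SOURCE B (Python) =====
-- from collections import defaultdict
--
--
-- def maximumDetonationDFS(bombs: list[list[int]]) -> int:
--     graph = defaultdict(list)
--     n = len(bombs)
--
--     # Build the graph (same O(n^2) pairwise scan as the original)
--     for i in range(n):
--         for j in range(i + 1, n):
--             xi, yi, ri = bombs[i]
--             xj, yj, rj = bombs[j]
--
--             dx2 = (xi - xj) ** 2
--             dy2 = (yi - yj) ** 2
--
--             if ri ** 2 >= dx2 + dy2:
--                 graph[i].append(j)
--             if rj ** 2 >= dx2 + dy2: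
--                 graph[j].append(i)
--
--     # Recursive DFS: mark the node, recurse into every unvisited neighbor,
--     # and report how many nodes ended up marked.
--     def dfs(node, visited):
--         visited.add(node)
--         for neighbor in graph[node]:
--             if neighbor not in visited:
--                 dfs(neighbor, visited)
--         return len(visited)
--
--     return max((dfs(i, set()) for i in range(n)), default=0)
-- ===== Notes on version B (the rewrite author's own statement) =====
-- stated objective: alternative
-- what changed: The per-source BFS (deque + while-loop over a queue) is replaced by a truly recursive DFS that marks a visited set and recurses into unvisited neighbors, with the per-source maximum taken via max(..., default=0); the pairwise graph-building double loop is kept identical.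
-- outside the precondition, e.g. on maximumDetonationDFS([[1, 2], [3, 4, 5]]): A raises ValueError, B raises ValueError
import Mathlib
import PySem

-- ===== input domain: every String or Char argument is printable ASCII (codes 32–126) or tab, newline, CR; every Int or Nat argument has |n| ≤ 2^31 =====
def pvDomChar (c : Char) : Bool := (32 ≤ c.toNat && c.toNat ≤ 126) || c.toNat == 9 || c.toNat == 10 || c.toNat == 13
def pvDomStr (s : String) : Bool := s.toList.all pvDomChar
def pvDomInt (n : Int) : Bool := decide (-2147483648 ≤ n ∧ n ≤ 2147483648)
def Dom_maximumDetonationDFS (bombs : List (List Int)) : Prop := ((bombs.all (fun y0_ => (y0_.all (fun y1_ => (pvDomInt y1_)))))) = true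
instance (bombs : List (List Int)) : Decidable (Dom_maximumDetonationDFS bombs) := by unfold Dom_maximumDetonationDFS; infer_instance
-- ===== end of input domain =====

-- B replaces A's BFS-per-source with a recursive DFS counting the visited set
-- (alternative decomposition, same asymptotic cost); the pairwise graph builder
-- is the identical double loop in both Pythons, so it is a shared helper here.

-- ===== PORT A =====
-- 'xi, yi, ri = bombs[i]': Python raises ValueError unless the row has exactly 3
-- entries; the catch-all branch returns a junk triple, reachable only outside Pre_.
def pvUnpack3 (l : List Int) : Int × Int × Int :=
  match l with
  | [x, y, r] => (x, y, r)
  | _ => (0, 0, 0)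

-- the pairwise double loop building the defaultdict(list) graph (identical in Source A and Source B)
def pvGraph (bombs : List (List Int)) : PySem.Dict Int (List Int) :=
  let n : Int := PySem.List.len bombs
  (PySem.List.pyRange 0 n 1).foldl (fun g i =>
    (PySem.List.pyRange (i + 1) n 1).foldl (fun g j =>
      let p := pvUnpack3 (PySem.List.pyGetD bombs i [])
      let q := pvUnpack3 (PySem.List.pyGetD bombs j [])
      let dx2 := (p.1 - q.1) ^ 2
      let dy2 := (p.2.1 - q.2.1) ^ 2
      let ri2 := p.2.2 ^ 2
      let rj2 := q.2.2 ^ 2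
      let g := if ri2 ≥ dx2 + dy2 then g.modify i [] (fun l => l ++ [j]) else g
      if rj2 ≥ dx2 + dy2 then g.modify j [] (fun l => l ++ [i]) else g) g)
    PySem.Dict.empty

-- the 'while queue' loop of bfs; fuel 2*n+2 provably drains the queue (measure argument below)
def pvBfsLoop (g : PySem.Dict Int (List Int)) : Nat → List Int → PySem.Set Int → PySem.Set Int
  | 0, _, vis => vis
  | fuel + 1, queue, vis =>
    match queue with
    | [] => vis
    | node :: rest =>
      let st := (g.getD node []).foldl
        (fun (st : List Int × PySem.Set Int) nb =>
          if PySem.Set.contains st.2 nb then st else (st.1 ++ [nb], PySem.Set.add st.2 nb))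
        (rest, vis)
      pvBfsLoop g fuel st.1 st.2

def pvBfs (g : PySem.Dict Int (List Int)) (n : Nat) (c : Int) : Int :=
  PySem.Set.len (pvBfsLoop g (2 * n + 2) [c] (PySem.Set.ofList [c]))

def maximumDetonationDFS (bombs : List (List Int)) : Int :=
  let graph := pvGraph bombs
  let n : Int := PySem.List.len bombs
  (PySem.List.pyRange 0 n 1).foldl (fun ans i => max ans (pvBfs graph bombs.length i)) 0

-- ===== PORT B =====
-- the recursive dfs of Source B; fuel n+1 provably covers the recursion depth (lemmas below)
mutual
def pvDfsGo (g : PySem.Dict Int (List Int)) (fuel : Nat) (node : Int) (vis : PySem.Set Int) :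
    PySem.Set Int :=
  match fuel with
  | 0 => vis
  | f + 1 => pvDfsNbrs g f (g.getD node []) (PySem.Set.add vis node)
termination_by (fuel, 0, 0)

def pvDfsNbrs (g : PySem.Dict Int (List Int)) (fuel : Nat) (ns : List Int) (vis : PySem.Set Int) :
    PySem.Set Int :=
  match ns with
  | [] => vis
  | nb :: rest =>
    pvDfsNbrs g fuel rest (if PySem.Set.contains vis nb then vis else pvDfsGo g fuel nb vis)
termination_by (fuel, 1, ns.length)
end

def pvDfs (g : PySem.Dict Int (List Int)) (n : Nat) (c : Int) : Int :=
  PySem.Set.len (pvDfsGo g (n + 1) c PySem.Set.empty)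

def maximumDetonationDFS_alt (bombs : List (List Int)) : Int :=
  let graph := pvGraph bombs
  let n : Int := PySem.List.len bombs
  match PySem.List.max?
      ((PySem.List.pyRange 0 n 1).map (fun i => pvDfs graph bombs.length i)) (fun x => x) with
  | none => 0
  | some m => m

-- ===== PRECONDITION & SPEC =====
-- Pre_ excludes exactly the inputs on which A raises: with at least two bombs every row
-- is tuple-unpacked as 'xi, yi, ri = bombs[i]', a ValueError unless the row has length 3.
def Pre_maximumDetonationDFS (bombs : List (List Int)) : Prop :=
  2 ≤ bombs.length → ∀ b ∈ bombs, b.length = 3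
instance (bombs : List (List Int)) : Decidable (Pre_maximumDetonationDFS bombs) := by
  unfold Pre_maximumDetonationDFS; infer_instance

def pvWitness_maximumDetonationDFS : List (List Int) := [[0, 0, 1], [2, 0, 2]]

def Spec_maximumDetonationDFS (bombs : List (List Int)) (out : Int) : Prop := out = maximumDetonationDFS_alt bombs
instance (bombs : List (List Int)) (out : Int) : Decidable (Spec_maximumDetonationDFS bombs out) := by unfold Spec_maximumDetonationDFS; infer_instance

-- ===== CLAIM (what is proved, stated in full; the proofs are below) =====
def Claim_equal_maximumDetonationDFS : Prop := ∀ (bombs : List (List Int)), Dom_maximumDetonationDFS bombs → Pre_maximumDetonationDFS bombs → Spec_maximumDetonationDFS bombs (maximumDetonationDFS bombs)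

-- ===== LEMMAS AND PROOFS =====

-- edge relation and reachability in the built graph
def pvEdge (g : PySem.Dict Int (List Int)) (a b : Int) : Prop := b ∈ g.getD a []
def pvReach (g : PySem.Dict Int (List Int)) (s x : Int) : Prop :=
  Relation.ReflTransGen (pvEdge g) s x

-- a Nodup list contained in another list is no longer than it
lemma pvNodupSubLen {l1 l2 : List Int} (h1 : l1.Nodup) (hs : ∀ x ∈ l1, x ∈ l2) :
    l1.length ≤ l2.length := by
  calc l1.length = l1.toFinset.card := (List.toFinset_card_of_nodup h1).symm
    _ ≤ l2.toFinset.card := Finset.card_le_card (by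
        intro x hx; simp only [List.mem_toFinset] at *; exact hs x hx)
    _ ≤ l2.length := l2.toFinset_card_le

-- fold invariance principle for the dict-building double loop
lemma pvFoldInv {γ : Type} (P : PySem.Dict Int (List Int) → Prop)
    (l : List γ) (f : PySem.Dict Int (List Int) → γ → PySem.Dict Int (List Int))
    (g : PySem.Dict Int (List Int)) (h0 : P g)
    (hstep : ∀ g x, x ∈ l → P g → P (f g x)) : P (l.foldl f g) := by
  induction l generalizing g with
  | nil => exact h0
  | cons x t ih =>
    exact ih (f g x) (hstep g x (by simp) h0) (fun g' y hy hP => hstep g' y (by simp [hy]) hP)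

-- every edge target of the built graph lies in range(n)
lemma pvGraph_targets (bombs : List (List Int)) :
    ∀ a b : Int, b ∈ (pvGraph bombs).getD a [] →
      b ∈ PySem.List.pyRange 0 (PySem.List.len bombs) 1 := by
  refine pvFoldInv
    (fun d => ∀ a b : Int, b ∈ d.getD a [] → b ∈ PySem.List.pyRange 0 (PySem.List.len bombs) 1)
    _ _ _ ?_ ?_
  · intro a b hb; simp [PySem.Dict.getD_empty] at hb
  · intro d i hi hP
    refine pvFoldInv
      (fun d => ∀ a b : Int, b ∈ d.getD a [] → b ∈ PySem.List.pyRange 0 (PySem.List.len bombs) 1)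
      _ _ _ hP ?_
    intro d' j hj hP'
    have hiR : i ∈ PySem.List.pyRange 0 (PySem.List.len bombs) 1 := hi
    have hjR : j ∈ PySem.List.pyRange 0 (PySem.List.len bombs) 1 := by
      rw [PySem.List.mem_pyRange_one] at hi hj ⊢; omega
    intro a b hb
    dsimp only at hb
    split_ifs at hb with h1 h2 h2 <;>
      try simp only [PySem.Dict.getD_modify] at hb
    all_goals try split_ifs at hb
    all_goals try simp only [List.mem_append, List.mem_singleton] at hb
    all_goals first
      | exact hP' _ b hb
      | (rcases hb with (hb | rfl) | rfl <;> first | exact hP' _ b hb | exact hiR | exact hjR)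
      | (rcases hb with hb | rfl <;> first | exact hP' _ b hb | exact hiR | exact hjR)

-- the inner neighbor fold of bfs appends the same fresh nodes to queue and visited
lemma pvBfsFold (ns : List Int) :
    ∀ (q : List Int) (vis : PySem.Set Int), vis.Nodup →
    ∃ d : List Int,
      (ns.foldl (fun (st : List Int × PySem.Set Int) nb =>
          if PySem.Set.contains st.2 nb then st else (st.1 ++ [nb], PySem.Set.add st.2 nb))
        (q, vis)) = (q ++ d, vis ++ d) ∧
      (∀ x ∈ d, x ∈ ns) ∧ (vis ++ d).Nodup ∧ (∀ y ∈ ns, y ∈ vis ++ d) := by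
  induction ns with
  | nil => intro q vis h; exact ⟨[], by simp, by simp, by simpa, by simp⟩
  | cons nb rest ih =>
    intro q vis h
    by_cases hmem : nb ∈ vis
    · obtain ⟨d, h1, h2, h3, h4⟩ := ih q vis h
      refine ⟨d, by simpa [hmem] using h1, fun x hx => List.mem_cons_of_mem _ (h2 x hx), h3, ?_⟩
      intro y hy
      rcases List.mem_cons.mp hy with rfl | hy
      · exact List.mem_append.mpr (Or.inl hmem)
      · exact h4 y hy
    · have hadd : PySem.Set.add vis nb = vis ++ [nb] := PySem.Set.add_of_not_mem hmem
      have hnd : (vis ++ [nb]).Nodup := by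
        rw [List.nodup_append]
        refine ⟨h, by simp, ?_⟩
        intro a ha b hb
        rcases List.mem_singleton.mp hb with rfl
        intro e
        subst e
        exact hmem ha
      obtain ⟨d, h1, h2, h3, h4⟩ := ih (q ++ [nb]) (vis ++ [nb]) hnd
      refine ⟨nb :: d, ?_, ?_, ?_, ?_⟩
      · simpa [hmem, hadd, List.append_assoc] using h1
      · intro x hx
        rcases List.mem_cons.mp hx with rfl | hx
        · exact List.mem_cons_self ..
        · exact List.mem_cons_of_mem _ (h2 x hx)
      · simpa [List.append_assoc] using h3
      · intro y hy
        rcases List.mem_cons.mp hy with rfl | hy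
        · simp
        · simpa [List.append_assoc] using h4 y hy

-- invariant of the bfs while-loop: with enough fuel the final visited set is Nodup
-- and holds exactly the nodes reachable from s
lemma pvBfsLoop_spec (g : PySem.Dict Int (List Int)) (U : List Int)
    (hg : ∀ a b : Int, b ∈ g.getD a [] → b ∈ U) (s : Int) :
    ∀ (fuel : Nat) (q : List Int) (vis : PySem.Set Int),
    vis.Nodup → (∀ x ∈ vis, x ∈ U) → (∀ x ∈ q, x ∈ vis) →
    (∀ x ∈ vis, pvReach g s x) →
    (∀ x ∈ vis, x ∉ q → ∀ y, y ∈ g.getD x [] → y ∈ vis) →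
    s ∈ vis →
    q.length + 2 * U.length < fuel + 2 * vis.length →
    (pvBfsLoop g fuel q vis).Nodup ∧ (∀ x, x ∈ pvBfsLoop g fuel q vis ↔ pvReach g s x) := by
  intro fuel
  induction fuel with
  | zero =>
    intro q vis hnd hvU hqv hreach hclosed hs hm
    exfalso
    have hle := pvNodupSubLen hnd hvU
    omega
  | succ f ih =>
    intro q vis hnd hvU hqv hreach hclosed hs hm
    match q, hqv, hclosed, hm with
    | [], hqv, hclosed, hm =>
      refine ⟨by simpa [pvBfsLoop] using hnd, ?_⟩
      intro x
      simp only [pvBfsLoop]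
      constructor
      · exact hreach x
      · intro hr
        induction hr with
        | refl => exact hs
        | tail hab hbc ihr => exact hclosed _ ihr (by simp) _ hbc
    | node :: rest, hqv, hclosed, hm =>
      obtain ⟨d, hfold, hdns, hndd, hns⟩ := pvBfsFold (g.getD node []) rest vis hnd
      have hnodevis : node ∈ vis := hqv node (by simp)
      simp only [pvBfsLoop]
      rw [hfold]
      apply ih
      · exact hndd
      · intro x hx
        rcases List.mem_append.mp hx with hx | hx
        · exact hvU x hx
        · exact hg node x (hdns x hx)
      · intro x hx
        rcases List.mem_append.mp hx with hx | hx
        · exact List.mem_append.mpr (Or.inl (hqv x (List.mem_cons_of_mem _ hx)))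
        · exact List.mem_append.mpr (Or.inr hx)
      · intro x hx
        rcases List.mem_append.mp hx with hx | hx
        · exact hreach x hx
        · exact Relation.ReflTransGen.tail (hreach node hnodevis) (hdns x hx)
      · intro x hx hxq y hy
        rcases List.mem_append.mp hx with hx | hx
        · by_cases hxn : x = node
          · subst hxn
            exact hns y hy
          · have hxnq : x ∉ node :: rest := by
              intro hc
              rcases List.mem_cons.mp hc with hc | hc
              · exact hxn hc
              · exact hxq (List.mem_append.mpr (Or.inl hc))
            exact List.mem_append.mpr (Or.inl (hclosed x hx hxnq y hy))
        · exact absurd (List.mem_append.mpr (Or.inr hx)) hxq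
      · exact List.mem_append.mpr (Or.inl hs)
      · simp only [List.length_append, List.length_cons] at hm ⊢
        omega

-- the guarantees of one recursive dfs call at a given fuel
def pvGoSpec (g : PySem.Dict Int (List Int)) (U : List Int) (fuel : Nat) : Prop :=
  ∀ (node : Int) (vis : PySem.Set Int),
    vis.Nodup → (∀ x ∈ vis, x ∈ U) → node ∈ U → node ∉ vis →
    U.length < fuel + vis.length →
    (pvDfsGo g fuel node vis).Nodup ∧
    (∀ x ∈ vis, x ∈ pvDfsGo g fuel node vis) ∧
    node ∈ pvDfsGo g fuel node vis ∧
    (∀ x ∈ pvDfsGo g fuel node vis, x ∈ U) ∧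
    (∀ x ∈ pvDfsGo g fuel node vis, x ∈ vis ∨ pvReach g node x) ∧
    (∀ x ∈ pvDfsGo g fuel node vis, x ∉ vis → ∀ y, y ∈ g.getD x [] → y ∈ pvDfsGo g fuel node vis)

-- folding dfs over a neighbor list keeps the same guarantees
lemma pvNbrs_spec (g : PySem.Dict Int (List Int)) (U : List Int)
    (fuel : Nat) (hgo : pvGoSpec g U fuel) :
    ∀ (ns : List Int), (∀ y ∈ ns, y ∈ U) →
    ∀ (vis : PySem.Set Int), vis.Nodup → (∀ x ∈ vis, x ∈ U) →
    U.length < fuel + vis.length →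
    (pvDfsNbrs g fuel ns vis).Nodup ∧
    (∀ x ∈ vis, x ∈ pvDfsNbrs g fuel ns vis) ∧
    (∀ y ∈ ns, y ∈ pvDfsNbrs g fuel ns vis) ∧
    (∀ x ∈ pvDfsNbrs g fuel ns vis, x ∈ U) ∧
    (∀ x ∈ pvDfsNbrs g fuel ns vis, x ∈ vis ∨ ∃ nb ∈ ns, pvReach g nb x) ∧
    (∀ x ∈ pvDfsNbrs g fuel ns vis, x ∉ vis → ∀ y, y ∈ g.getD x [] → y ∈ pvDfsNbrs g fuel ns vis) := by
  intro ns
  induction ns with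
  | nil =>
    intro hnsU vis hnd hvU hm
    simp only [pvDfsNbrs]
    refine ⟨hnd, fun x hx => hx, ?_, hvU, fun x hx => Or.inl hx,
      fun x hx hxv y hy => absurd hx hxv⟩
    intro y hy
    cases hy
  | cons nb rest ih =>
    intro hnsU vis hnd hvU hm
    have hnbU : nb ∈ U := hnsU nb (by simp)
    have hrestU : ∀ y ∈ rest, y ∈ U := fun y hy => hnsU y (List.mem_cons_of_mem _ hy)
    by_cases hmem : nb ∈ vis
    · have hred : pvDfsNbrs g fuel (nb :: rest) vis = pvDfsNbrs g fuel rest vis := by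
        simp [pvDfsNbrs, hmem]
      obtain ⟨c1, c2, c3, c4, c5, c6⟩ := ih hrestU vis hnd hvU hm
      rw [hred]
      refine ⟨c1, c2, ?_, c4, ?_, c6⟩
      · intro y hy
        rcases List.mem_cons.mp hy with rfl | hy
        · exact c2 y hmem
        · exact c3 y hy
      · intro x hx
        rcases c5 x hx with hx' | ⟨m, hm', hr⟩
        · exact Or.inl hx'
        · exact Or.inr ⟨m, List.mem_cons_of_mem _ hm', hr⟩
    · have hred : pvDfsNbrs g fuel (nb :: rest) vis
          = pvDfsNbrs g fuel rest (pvDfsGo g fuel nb vis) := by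
        simp [pvDfsNbrs, hmem]
      obtain ⟨g1, g2, g3, g4, g5, g6⟩ := hgo nb vis hnd hvU hnbU hmem hm
      have hlen : vis.length ≤ (pvDfsGo g fuel nb vis).length := pvNodupSubLen hnd g2
      obtain ⟨c1, c2, c3, c4, c5, c6⟩ := ih hrestU (pvDfsGo g fuel nb vis) g1 g4 (by omega)
      rw [hred]
      refine ⟨c1, ?_, ?_, c4, ?_, ?_⟩
      · intro x hx
        exact c2 x (g2 x hx)
      · intro y hy
        rcases List.mem_cons.mp hy with rfl | hy
        · exact c2 y g3
        · exact c3 y hy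
      · intro x hx
        rcases c5 x hx with hx' | ⟨m, hm', hr⟩
        · rcases g5 x hx' with hv | hr
          · exact Or.inl hv
          · exact Or.inr ⟨nb, by simp, hr⟩
        · exact Or.inr ⟨m, List.mem_cons_of_mem _ hm', hr⟩
      · intro x hx hxv y hy
        by_cases hx1 : x ∈ pvDfsGo g fuel nb vis
        · exact c2 y (g6 x hx1 hxv y hy)
        · exact c6 x hx hx1 y hy

lemma pvGo_spec (g : PySem.Dict Int (List Int)) (U : List Int)
    (hg : ∀ a b : Int, b ∈ g.getD a [] → b ∈ U) :
    ∀ fuel, pvGoSpec g U fuel := by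
  intro fuel
  induction fuel with
  | zero =>
    intro node vis hnd hvU hnU hnv hm
    exfalso
    have hle := pvNodupSubLen hnd hvU
    omega
  | succ f ih =>
    intro node vis hnd hvU hnU hnv hm
    have hadd : PySem.Set.add vis node = vis ++ [node] := PySem.Set.add_of_not_mem hnv
    have hnd' : (vis ++ [node]).Nodup := by
      rw [List.nodup_append]
      refine ⟨hnd, by simp, ?_⟩
      intro a ha b hb
      rcases List.mem_singleton.mp hb with rfl
      intro e
      subst e
      exact hnv ha
    have hvU' : ∀ x ∈ vis ++ [node], x ∈ U := by
      intro x hx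
      rcases List.mem_append.mp hx with hx | hx
      · exact hvU x hx
      · rcases List.mem_singleton.mp hx with rfl
        exact hnU
    have hm' : U.length < f + (vis ++ [node]).length := by
      simp only [List.length_append, List.length_singleton]
      omega
    obtain ⟨c1, c2, c3, c4, c5, c6⟩ :=
      pvNbrs_spec g U f ih (g.getD node []) (fun y hy => hg node y hy)
        (vis ++ [node]) hnd' hvU' hm'
    have hred : pvDfsGo g (f + 1) node vis = pvDfsNbrs g f (g.getD node []) (vis ++ [node]) := by
      rw [pvDfsGo, hadd]
    rw [hred]
    refine ⟨c1, ?_, ?_, c4, ?_, ?_⟩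
    · intro x hx
      exact c2 x (List.mem_append.mpr (Or.inl hx))
    · exact c2 node (List.mem_append.mpr (Or.inr (by simp)))
    · intro x hx
      rcases c5 x hx with hx' | ⟨m, hm2, hr⟩
      · rcases List.mem_append.mp hx' with hx' | hx'
        · exact Or.inl hx'
        · rcases List.mem_singleton.mp hx' with rfl
          exact Or.inr Relation.ReflTransGen.refl
      · exact Or.inr (Relation.ReflTransGen.head hm2 hr)
    · intro x hx hxv y hy
      by_cases hxn : x = node
      · subst hxn
        exact c3 y hy
      · have hnm : x ∉ vis ++ [node] := by
          intro hc
          rcases List.mem_append.mp hc with hc | hc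
          · exact hxv hc
          · exact hxn (List.mem_singleton.mp hc)
        exact c6 x hx hnm y hy

-- per-source counts of the two traversals agree
lemma pvCounts_eq (bombs : List (List Int)) (i : Int)
    (hi : i ∈ PySem.List.pyRange 0 (PySem.List.len bombs) 1) :
    pvBfs (pvGraph bombs) bombs.length i = pvDfs (pvGraph bombs) bombs.length i := by
  set g := pvGraph bombs with hgdef
  set U := PySem.List.pyRange 0 (PySem.List.len bombs) 1 with hUdef
  have hU : U.Nodup := PySem.List.nodup_pyRange_one 0 (PySem.List.len bombs)
  have hg : ∀ a b : Int, b ∈ g.getD a [] → b ∈ U := pvGraph_targets bombs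
  have hUlen : U.length = bombs.length := by
    rw [hUdef, PySem.List.length_pyRange_one]
    simp [PySem.List.len_eq]
  have hofl : PySem.Set.ofList [i] = ([i] : List Int) :=
    PySem.Set.ofList_eq_self_of_nodup _ (by simp)
  obtain ⟨hbnd, hbmem⟩ := pvBfsLoop_spec g U hg i (2 * bombs.length + 2) [i] [i]
    (by simp)
    (by intro x hx; rcases List.mem_singleton.mp hx with rfl; exact hi)
    (fun x hx => hx)
    (by intro x hx; rcases List.mem_singleton.mp hx with rfl; exact Relation.ReflTransGen.refl)
    (fun x hx hxq => absurd hx hxq)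
    (by simp)
    (by simp [hUlen]; omega)
  obtain ⟨d1, d2, d3, d4, d5, d6⟩ := pvGo_spec g U hg (bombs.length + 1) i ([] : List Int)
    (by simp) (by intro x hx; cases hx) hi (by intro h; cases h)
    (by simp [hUlen])
  have hdmem : ∀ x, x ∈ pvDfsGo g (bombs.length + 1) i ([] : List Int) ↔ pvReach g i x := by
    intro x
    constructor
    · intro hx
      rcases d5 x hx with hx' | hr
      · cases hx'
      · exact hr
    · intro hr
      induction hr with
      | refl => exact d3
      | tail hab hbc ihr => exact d6 _ ihr (by intro hc; cases hc) _ hbc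
  have hperm : (pvBfsLoop g (2 * bombs.length + 2) [i] [i]).Perm
      (pvDfsGo g (bombs.length + 1) i ([] : List Int)) :=
    (List.perm_ext_iff_of_nodup hbnd d1).mpr (fun a => (hbmem a).trans (hdmem a).symm)
  unfold pvBfs pvDfs
  rw [hofl]
  simp only [PySem.Set.len, PySem.Set.empty]
  rw [hperm.length_eq]

-- ===== VERDICT (by name: the statement is the Claim_ definition above) =====
theorem maximumDetonationDFS_spec : Claim_equal_maximumDetonationDFS := by
  unfold Claim_equal_maximumDetonationDFS
  intro bombs _ _
  unfold Spec_maximumDetonationDFS maximumDetonationDFS maximumDetonationDFS_alt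
  simp only []
  rw [PySem.List.foldl_congr_mem _ _
    (fun ans i => max ans (pvDfs (pvGraph bombs) bombs.length i)) 0
    (fun ans i hi => by rw [pvCounts_eq bombs i hi])]
  rw [← List.foldl_map (f := fun i => pvDfs (pvGraph bombs) bombs.length i) (g := max)]
  have hpos : ∀ y ∈ (PySem.List.pyRange 0 (PySem.List.len bombs) 1).map
      (fun i => pvDfs (pvGraph bombs) bombs.length i), 0 ≤ y := by
    intro y hy
    obtain ⟨i, _, rfl⟩ := List.mem_map.mp hy
    simp only [pvDfs, PySem.Set.len]
    exact Int.natCast_nonneg _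
  cases hmap : (PySem.List.pyRange 0 (PySem.List.len bombs) 1).map
      (fun i => pvDfs (pvGraph bombs) bombs.length i) with
  | nil => rfl
  | cons y t =>
    rw [PySem.List.max?_id_cons]
    have hy0 : 0 ≤ y := hpos y (by rw [hmap]; simp)
    simp only [List.foldl_cons, max_eq_right hy0]
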